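-- pv_equiv track=rewrite | github.com/yeastgenome/SGDBackend | utils/graph.py | weed_out_by_evidence
-- ===== SOURCE A (Python) =====
-- def weed_out_by_evidence(neighbors, neighbor_evidence_count, max_count=100):
--     if len(neighbors) < max_count:
--         return neighbors, 1
--
--     evidence_to_neighbors = {}
--     for neigh in neighbors:
--         evidence_count = neighbor_evidence_count[neigh]
--         if evidence_count in evidence_to_neighbors:
--             evidence_to_neighbors[evidence_count].append(neigh)
--         else:
--             evidence_to_neighbors[evidence_count] = [neigh]
--
--     sorted_keys = sorted(evidence_to_neighbors.keys(), reverse=True)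
--     keep = []
--     min_evidence_count = max(sorted_keys)
--     for key in sorted_keys:
--         ns = evidence_to_neighbors[key]
--         if len(keep) + len(ns) < max_count:
--             keep.extend(ns)
--             min_evidence_count = key
--     return keep, min_evidence_count
-- ===== SOURCE B (Python) =====
-- def weed_out_by_evidence(neighbors, neighbor_evidence_count, max_count=100):
--     if len(neighbors) < max_count:
--         return neighbors, 1
--     counts = [neighbor_evidence_count[n] for n in neighbors]
--     keys = sorted(set(counts), reverse=True)
--     keep = []
--     min_evidence_count = keys[0]
--     for key in keys:
--         group = [n for n, c in zip(neighbors, counts) if c == key]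
--         if len(keep) + len(group) < max_count:
--             keep += group
--             min_evidence_count = key
--     return keep, min_evidence_count
-- ===== Notes on version B (the rewrite author's own statement) =====
-- stated objective: alternative
-- what changed: Replaces A's mutable dict-of-buckets index (build buckets, sort the dict keys, look each bucket up) by a dict-free pipeline: precompute the counts list, sort the distinct counts descending, and materialise each evidence group on demand with a zip-filter comprehension.
import Mathlib
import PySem

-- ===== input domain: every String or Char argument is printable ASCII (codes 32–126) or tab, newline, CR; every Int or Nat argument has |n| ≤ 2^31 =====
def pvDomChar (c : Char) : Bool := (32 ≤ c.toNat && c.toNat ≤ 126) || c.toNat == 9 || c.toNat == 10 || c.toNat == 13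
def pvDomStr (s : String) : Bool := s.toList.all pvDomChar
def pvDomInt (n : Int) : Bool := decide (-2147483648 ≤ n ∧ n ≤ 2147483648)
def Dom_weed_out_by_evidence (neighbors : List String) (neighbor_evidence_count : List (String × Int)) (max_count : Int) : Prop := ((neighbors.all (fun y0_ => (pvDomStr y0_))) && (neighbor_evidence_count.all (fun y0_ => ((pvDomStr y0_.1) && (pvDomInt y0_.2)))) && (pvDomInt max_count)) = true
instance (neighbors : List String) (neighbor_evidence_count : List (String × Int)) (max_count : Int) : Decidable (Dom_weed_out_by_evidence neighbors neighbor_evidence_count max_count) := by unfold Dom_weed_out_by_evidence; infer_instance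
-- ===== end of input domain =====

-- B replaces A's dict-of-buckets index by a dict-free pipeline (counts list, sorted distinct
-- counts, zip-filter groups); alternative structure, same return value on all of Pre_.

-- ===== PORT A =====
-- A's dict lookups neighbor_evidence_count[neigh] raise KeyError on a missing key and
-- max(sorted_keys) raises ValueError when neighbors = [] with max_count ≤ 0; Pre_ excludes
-- exactly those, so the getD 0 defaults below are never reached on Pre_.
def weed_out_by_evidence (neighbors : List String) (neighbor_evidence_count : List (String × Int)) (max_count : Int) : List String × Int :=
  if (neighbors.length : Int) < max_count then (neighbors, 1)
  else
    let necD : PySem.Dict String Int := PySem.Dict.mk neighbor_evidence_count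
    let d : PySem.Dict Int (List String) :=
      neighbors.foldl (fun d neigh =>
        let c := necD.getD neigh 0
        match d.get? c with
        | some l => d.insert c (l ++ [neigh])
        | none   => d.insert c [neigh]) PySem.Dict.empty
    let sorted_keys := PySem.List.sorted d.keys (fun k => k) true
    let min0 := (PySem.List.max? sorted_keys (fun k => k)).getD 0
    sorted_keys.foldl (fun s key =>
      let ns := d.getD key []
      if (s.1.length : Int) + ns.length < max_count then (s.1 ++ ns, key) else s)
      (([] : List String), min0)

-- ===== PORT B =====
def weed_out_by_evidence_alt (neighbors : List String) (neighbor_evidence_count : List (String × Int)) (max_count : Int) : List String × Int :=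
  if (neighbors.length : Int) < max_count then (neighbors, 1)
  else
    let necD : PySem.Dict String Int := PySem.Dict.mk neighbor_evidence_count
    let counts := neighbors.map (fun n => necD.getD n 0)
    let keys := PySem.List.sorted (PySem.Set.ofList counts) (fun k => k) true
    let min0 := (PySem.List.pyGet? keys 0).getD 0
    keys.foldl (fun s key =>
      let group := ((neighbors.zip counts).filter (fun p => p.2 == key)).map (·.1)
      if (s.1.length : Int) + group.length < max_count then (s.1 ++ group, key) else s)
      (([] : List String), min0)

-- ===== PRECONDITION & SPEC =====
-- Pre_ excludes exactly the inputs on which the Python A raises: when len(neighbors) >= max_count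
-- it needs every neighbor to be a key of the dict (else KeyError) and neighbors to be nonempty
-- (else max([]) raises ValueError).
def Pre_weed_out_by_evidence (neighbors : List String) (neighbor_evidence_count : List (String × Int)) (max_count : Int) : Prop :=
  (neighbors.length : Int) < max_count ∨
    (neighbors ≠ [] ∧ neighbors.all (fun n => (PySem.Dict.mk neighbor_evidence_count).contains n) = true)
instance (neighbors : List String) (neighbor_evidence_count : List (String × Int)) (max_count : Int) : Decidable (Pre_weed_out_by_evidence neighbors neighbor_evidence_count max_count) := by unfold Pre_weed_out_by_evidence; infer_instance

def pvWitness_weed_out_by_evidence : List String × (List (String × Int)) × Int :=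
  (["a", "b"], [("a", 2), ("b", 1)], 1)

def Spec_weed_out_by_evidence (neighbors : List String) (neighbor_evidence_count : List (String × Int)) (max_count : Int) (out : List String × Int) : Prop := out = weed_out_by_evidence_alt neighbors neighbor_evidence_count max_count
instance (neighbors : List String) (neighbor_evidence_count : List (String × Int)) (max_count : Int) (out : List String × Int) : Decidable (Spec_weed_out_by_evidence neighbors neighbor_evidence_count max_count out) := by unfold Spec_weed_out_by_evidence; infer_instance

-- ===== CLAIM (what is proved, stated in full; the proofs are below) =====
def Claim_equal_weed_out_by_evidence : Prop := ∀ (neighbors : List String) (neighbor_evidence_count : List (String × Int)) (max_count : Int), Dom_weed_out_by_evidence neighbors neighbor_evidence_count max_count → Pre_weed_out_by_evidence neighbors neighbor_evidence_count max_count → Spec_weed_out_by_evidence neighbors neighbor_evidence_count max_count (weed_out_by_evidence neighbors neighbor_evidence_count max_count)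

-- ===== LEMMAS AND PROOFS =====

-- A's if/else bucket update is exactly "insert the extended bucket".
theorem pvBucketStep (d : PySem.Dict Int (List String)) (c : Int) (n : String) :
    (match d.get? c with
     | some l => d.insert c (l ++ [n])
     | none   => d.insert c [n]) = d.modify c [] (· ++ [n]) := by
  cases h : d.get? c with
  | some l => simp [PySem.Dict.modify, PySem.Dict.getD_eq_get?_getD, h]
  | none => simp [PySem.Dict.modify, PySem.Dict.getD_eq_get?_getD, h]

-- Both group computations are neighbors filtered by evidence value.
theorem pvGroupA (neighbors : List String) (key : String → Int) (k : Int) :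
    (((neighbors.map (fun n => (key n, n))).filter (fun p => p.1 == k)).map (·.2))
      = neighbors.filter (fun n => key n == k) := by
  induction neighbors with
  | nil => rfl
  | cons x t ih =>
    by_cases h : key x == k <;> simp [h, ih]

theorem pvGroupB (neighbors : List String) (key : String → Int) (k : Int) :
    (((neighbors.zip (neighbors.map key)).filter (fun p => p.2 == k)).map (·.1))
      = neighbors.filter (fun n => key n == k) := by
  rw [← List.map_prod_left_eq_zip]
  induction neighbors with
  | nil => rfl
  | cons x t ih =>
    by_cases h : key x == k <;> simp [h, ih]

-- The bucket dict of A, re-expressed through the modify-grouping lemmas.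
theorem pvDictEq (neighbors : List String) (key : String → Int) :
    neighbors.foldl (fun d neigh =>
        match d.get? (key neigh) with
        | some l => d.insert (key neigh) (l ++ [neigh])
        | none   => d.insert (key neigh) [neigh]) PySem.Dict.empty
      = (neighbors.map (fun n => (key n, n))).foldl
          (fun d p => d.modify p.1 [] (· ++ [p.2])) PySem.Dict.empty := by
  rw [List.foldl_map]
  apply PySem.List.foldl_congr_mem
  intro acc x _
  exact pvBucketStep acc (key x) x

theorem pvKeysEq (neighbors : List String) (key : String → Int) :
    ((neighbors.map (fun n => (key n, n))).foldl
        (fun d p => d.modify p.1 [] (· ++ [p.2])) PySem.Dict.empty).keys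
      = PySem.Set.ofList (neighbors.map key) := by
  have h := PySem.Dict.keys_foldl_modify_key (neighbors.map (fun n => (key n, n)))
    Prod.fst ([] : List String) (fun _ p v => v ++ [p.2]) PySem.Dict.empty
  simpa [PySem.Dict.keys_empty, PySem.Set.update, PySem.Set.ofList_eq_foldl] using h

theorem pvGetDEq (neighbors : List String) (key : String → Int) (k : Int) :
    ((neighbors.map (fun n => (key n, n))).foldl
        (fun d p => d.modify p.1 [] (· ++ [p.2])) PySem.Dict.empty).getD k []
      = neighbors.filter (fun n => key n == k) := by
  rw [PySem.Dict.getD_foldl_modify_append]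
  simpa [List.filter_map, Function.comp] using pvGroupA neighbors key k

-- The first element of a descending sorted list is the Python max of that list.
theorem pvMaxHead (l : List Int) (hs : ∃ xs, l = PySem.List.sorted xs (fun k => k) true) :
    (PySem.List.max? l (fun k => k)).getD 0 = (PySem.List.pyGet? l 0).getD 0 := by
  cases hl : l with
  | nil => simp [PySem.List.max?, PySem.List.pyGet?]
  | cons m t =>
    obtain ⟨xs, hx⟩ := hs
    have hm : ∀ y ∈ l, y ≤ m := by
      intro y hy
      have h2 := PySem.List.key_head_sorted_rev_ge (xs := xs) (key := fun k => k) (hx ▸ hl)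
      exact h2 y (by rw [← PySem.List.mem_sorted (key := fun k => k) (rev := true), ← hx]; exact hy)
    cases hmax : PySem.List.max? l (fun k => k) with
    | none => rw [hl] at hmax; simp [PySem.List.max?_eq_none_iff] at hmax
    | some v =>
      have hv₁ : v ≤ m := hm v (PySem.List.max?_mem hmax)
      have hv₂ : m ≤ v := PySem.List.max?_isMax hmax m (by rw [hl]; exact List.mem_cons_self)
      have : v = m := le_antisymm hv₁ hv₂
      rw [hl] at hmax
      simp [hmax, this, PySem.List.pyGet?, PySem.List.pyIdx?]

-- ===== VERDICT (by name: the statement is the Claim_ definition above) =====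
theorem weed_out_by_evidence_spec : Claim_equal_weed_out_by_evidence := by
  intro neighbors nec max_count _ _
  unfold Spec_weed_out_by_evidence weed_out_by_evidence weed_out_by_evidence_alt
  by_cases hlt : (neighbors.length : Int) < max_count
  · simp [hlt]
  · simp only [hlt, if_false]
    set key : String → Int := fun n => (PySem.Dict.mk nec).getD n 0 with hkey
    have hdict := pvDictEq neighbors key
    have hkeys : (neighbors.foldl (fun d neigh =>
        match d.get? (key neigh) with
        | some l => d.insert (key neigh) (l ++ [neigh])
        | none   => d.insert (key neigh) [neigh]) PySem.Dict.empty).keys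
        = PySem.Set.ofList (neighbors.map key) := by
      rw [hdict]; exact pvKeysEq neighbors key
    rw [hkeys, pvMaxHead _ ⟨_, rfl⟩]
    apply PySem.List.foldl_congr_mem
    intro acc k _
    have hA : (neighbors.foldl (fun d neigh =>
        match d.get? (key neigh) with
        | some l => d.insert (key neigh) (l ++ [neigh])
        | none   => d.insert (key neigh) [neigh]) PySem.Dict.empty).getD k []
        = neighbors.filter (fun n => key n == k) := by
      rw [hdict]; exact pvGetDEq neighbors key k
    rw [hA, pvGroupB neighbors key k]
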